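-- pv_equiv track=rewrite | github.com/AskSid/multimodal_concept_learning | src/datasets/imagenet/create_imagenet_dataset.py | get_imagenet1k_leaf_synsets
-- ===== SOURCE A (Python) =====
-- from typing import List, Dict, Tuple
--
-- def get_imagenet1k_leaf_synsets(synset: str, parent_to_children: Dict[str, List[str]],
--                                 ilsvrc_wnids: set) -> List[str]:
--     """Get all ImageNet-1K leaf synsets under a given synset."""
--     if synset not in parent_to_children:
--         return [synset] if synset in ilsvrc_wnids else []
--
--     leaves = []
--     for child in parent_to_children[synset]:
--         if child in ilsvrc_wnids:
--             leaves.append(child)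
--         else:
--             leaves.extend(get_imagenet1k_leaf_synsets(child, parent_to_children, ilsvrc_wnids))
--     return leaves
-- ===== SOURCE B (Python) =====
-- def get_imagenet1k_leaf_synsets(synset, parent_to_children, ilsvrc_wnids):
--     """Get all ImageNet-1K leaf synsets under a given synset."""
--     if synset not in parent_to_children:
--         return [synset] if synset in ilsvrc_wnids else []
--     leaves = []
--     stack = list(reversed(parent_to_children[synset]))
--     while stack:
--         node = stack.pop()
--         if node in ilsvrc_wnids:
--             leaves.append(node)
--         elif node in parent_to_children:
--             stack.extend(reversed(parent_to_children[node]))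
--     return leaves
-- ===== Notes on version B (the rewrite author's own statement) =====
-- stated objective: alternative
-- what changed: A's self-recursive tree walk is replaced by an iterative loop over an explicit stack (children pushed in reverse so the pop order reproduces A's left-to-right pre-order), accumulating leaves in a single output list.
import Mathlib
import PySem

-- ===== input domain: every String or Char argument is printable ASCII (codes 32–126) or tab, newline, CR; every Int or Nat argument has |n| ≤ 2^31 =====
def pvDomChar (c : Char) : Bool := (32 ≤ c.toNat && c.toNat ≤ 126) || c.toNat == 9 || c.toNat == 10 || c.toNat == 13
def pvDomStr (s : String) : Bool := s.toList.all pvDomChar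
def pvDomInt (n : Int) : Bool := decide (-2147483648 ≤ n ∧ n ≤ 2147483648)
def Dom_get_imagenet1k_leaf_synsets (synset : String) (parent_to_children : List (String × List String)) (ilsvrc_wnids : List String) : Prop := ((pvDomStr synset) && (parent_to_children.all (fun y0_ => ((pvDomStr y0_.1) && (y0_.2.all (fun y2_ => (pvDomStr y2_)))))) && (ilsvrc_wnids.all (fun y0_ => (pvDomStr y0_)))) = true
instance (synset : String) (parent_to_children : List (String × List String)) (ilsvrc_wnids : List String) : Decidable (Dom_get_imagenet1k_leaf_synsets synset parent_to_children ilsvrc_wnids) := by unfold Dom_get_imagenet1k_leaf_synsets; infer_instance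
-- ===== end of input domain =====

-- B replaces A's recursion by an explicit stack loop (reversed-children pushes); same cost, different control structure.
-- Both ports are fuel-bounded transcriptions: on inputs satisfying Pre_ (no non-ILSVRC key cycle reachable from synset,
-- where the Python A would exceed the recursion limit) the fuel parent_to_children.length + 1 is never exhausted.

-- ===== PORT A =====
-- dict lookup, first match (Python dicts have unique keys)
def pvLookup (ptc : List (String × List String)) (x : String) : Option (List String) :=
  (PySem.Dict.mk ptc).get? x

def pvGoA (ptc : List (String × List String)) (il : List String) : Nat → String → List String
  | 0, _ => []
  | n+1, synset =>
    match pvLookup ptc synset with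
    | none => if il.contains synset then [synset] else []
    | some children =>
      children.foldl (fun leaves child =>
        if il.contains child then leaves ++ [child]
        else leaves ++ pvGoA ptc il n child) []

def get_imagenet1k_leaf_synsets (synset : String) (parent_to_children : List (String × List String)) (ilsvrc_wnids : List String) : List String :=
  pvGoA parent_to_children ilsvrc_wnids (parent_to_children.length + 1) synset

-- ===== PORT B =====
-- total number of children entries: an upper bound on any children list length (for the stack loop's measure)
def pvCBound (ptc : List (String × List String)) : Nat :=
  (ptc.map (fun p => p.2.length)).sum

theorem pvLookup_length_le (ptc : List (String × List String)) (x : String) (ch : List String)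
    (h : pvLookup ptc x = some ch) : ch.length ≤ pvCBound ptc := by
  induction ptc with
  | nil => simp [pvLookup, PySem.Dict.get?] at h
  | cons p rest ih =>
    rw [pvLookup, PySem.Dict.get?_mk_cons] at h
    by_cases hk : (p.1 == x) = true
    · simp [hk] at h; simp [pvCBound, h]
    · simp [hk] at h
      have := ih (by rw [pvLookup]; exact h)
      simp [pvCBound] at this ⊢; omega

-- measure arithmetic for the stack loop's termination
theorem pvSum_map_pair (C d : Nat) (ch : List String) :
    ((ch.map (fun c => (c, d))).map (fun p : String × Nat => (C + 1) ^ (p.2 + 1))).sum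
      = ch.length * (C + 1) ^ (d + 1) := by
  induction ch with
  | nil => simp
  | cons c ch' ih =>
    simp only [List.map_cons, List.sum_cons, List.length_cons]
    rw [ih]; ring

-- the stack holds (node, remaining depth); fuel tags mirror A's recursion depth exactly
def pvGoB (ptc : List (String × List String)) (il : List String) :
    List (String × Nat) → List String → List String
  | [], leaves => leaves
  | (x, d) :: rest, leaves =>
    if il.contains x then pvGoB ptc il rest (leaves ++ [x])
    else
      match h : pvLookup ptc x with
      | none => pvGoB ptc il rest leaves
      | some children =>
        match d with
        | 0 => pvGoB ptc il rest leaves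
        | d+1 => pvGoB ptc il (children.map (fun c => (c, d)) ++ rest) leaves
  termination_by stack _ => (stack.map (fun p => (pvCBound ptc + 1) ^ (p.2 + 1))).sum
  decreasing_by
  all_goals simp only [List.map_cons, List.sum_cons, List.map_append, List.sum_append,
    List.map_map, Nat.succ_eq_add_one]
  all_goals try exact Nat.lt_add_of_pos_left (by positivity)
  have hle : children.length ≤ pvCBound ptc := pvLookup_length_le ptc x children h
  have hsum := pvSum_map_pair (pvCBound ptc) d children
  rw [List.map_map] at hsum
  rw [hsum]
  have h1 : children.length * (pvCBound ptc + 1) ^ (d + 1)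
      < (pvCBound ptc + 1) ^ (d + 1 + 1) := by
    calc children.length * (pvCBound ptc + 1) ^ (d + 1)
        ≤ pvCBound ptc * (pvCBound ptc + 1) ^ (d + 1) :=
          Nat.mul_le_mul_right _ hle
      _ < (pvCBound ptc + 1) * (pvCBound ptc + 1) ^ (d + 1) := by
          have hp : (0:ℕ) < (pvCBound ptc + 1) ^ (d + 1) := by positivity
          exact (Nat.mul_lt_mul_right hp).mpr (Nat.lt_succ_self _)
      _ = (pvCBound ptc + 1) ^ (d + 1 + 1) := by ring
  omega

def get_imagenet1k_leaf_synsets_alt (synset : String) (parent_to_children : List (String × List String)) (ilsvrc_wnids : List String) : List String :=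
  match pvLookup parent_to_children synset with
  | none => if ilsvrc_wnids.contains synset then [synset] else []
  | some children =>
    pvGoB parent_to_children ilsvrc_wnids
      (children.map (fun c => (c, parent_to_children.length))) []

-- ===== PRECONDITION & SPEC =====
-- machinery for Pre_: nodes reachable by A's expansion (ILSVRC members and non-keys are emitted/dropped, not expanded)
def pvExpandOnce (ptc : List (String × List String)) (il : List String) (x : String) : List String :=
  if il.contains x then [] else (pvLookup ptc x).getD []

def pvReachStep (ptc : List (String × List String)) (il : List String) (S : List String) : List String :=
  (S.flatMap (pvExpandOnce ptc il)).foldl (fun acc c => if acc.contains c then acc else acc ++ [c]) S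

def pvReach (ptc : List (String × List String)) (il : List String) (start : List String) : List String :=
  (pvReachStep ptc il)^[ptc.length + pvCBound ptc + 1] start

-- Pre_ excludes exactly the inputs on which the Python A never returns (RecursionError): a key not in
-- ilsvrc_wnids, reachable from synset by A's expansion, that lies on a cycle of such keys.
def Pre_get_imagenet1k_leaf_synsets (synset : String) (parent_to_children : List (String × List String)) (ilsvrc_wnids : List String) : Prop :=
  ∀ k ∈ pvReach parent_to_children ilsvrc_wnids ((pvLookup parent_to_children synset).getD []),
    ilsvrc_wnids.contains k = false →
    (pvLookup parent_to_children k).isSome = true →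
    k ∉ pvReach parent_to_children ilsvrc_wnids ((pvLookup parent_to_children k).getD [])

instance (synset : String) (parent_to_children : List (String × List String)) (ilsvrc_wnids : List String) : Decidable (Pre_get_imagenet1k_leaf_synsets synset parent_to_children ilsvrc_wnids) := by unfold Pre_get_imagenet1k_leaf_synsets; infer_instance

def pvWitness_get_imagenet1k_leaf_synsets : String × (List (String × List String)) × List String :=
  ("n1", [("n1", ["n2", "n3"]), ("n2", ["n4"])], ["n3", "n4"])

def Spec_get_imagenet1k_leaf_synsets (synset : String) (parent_to_children : List (String × List String)) (ilsvrc_wnids : List String) (out : List String) : Prop := out = get_imagenet1k_leaf_synsets_alt synset parent_to_children ilsvrc_wnids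
instance (synset : String) (parent_to_children : List (String × List String)) (ilsvrc_wnids : List String) (out : List String) : Decidable (Spec_get_imagenet1k_leaf_synsets synset parent_to_children ilsvrc_wnids out) := by unfold Spec_get_imagenet1k_leaf_synsets; infer_instance

-- ===== CLAIM (what is proved, stated in full; the proofs are below) =====
def Claim_equal_get_imagenet1k_leaf_synsets : Prop := ∀ (synset : String) (parent_to_children : List (String × List String)) (ilsvrc_wnids : List String), Dom_get_imagenet1k_leaf_synsets synset parent_to_children ilsvrc_wnids → Pre_get_imagenet1k_leaf_synsets synset parent_to_children ilsvrc_wnids → Spec_get_imagenet1k_leaf_synsets synset parent_to_children ilsvrc_wnids (get_imagenet1k_leaf_synsets synset parent_to_children ilsvrc_wnids)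

-- ===== LEMMAS AND PROOFS =====
-- what one child contributes in A's loop
def pvLeafOf (ptc : List (String × List String)) (il : List String) (n : Nat) (c : String) : List String :=
  if il.contains c then [c] else pvGoA ptc il n c

theorem pvGoA_foldl_eq_flatMap (ptc : List (String × List String)) (il : List String) (n : Nat) (ch : List String) :
    ch.foldl (fun leaves child =>
        if il.contains child then leaves ++ [child]
        else leaves ++ pvGoA ptc il n child) []
      = ch.flatMap (pvLeafOf ptc il n) := by
  have h := PySem.List.foldl_append_eq_flatMap (pvLeafOf ptc il n) ch []
  rw [List.nil_append] at h
  rw [← h]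
  apply PySem.List.foldl_congr_mem'
  intro c _ acc
  simp only [pvLeafOf]
  split_ifs <;> rfl

-- the key invariant: popping a block of nodes tagged n off the stack appends exactly
-- what A's loop at fuel n produces for those children
theorem pvGoB_block (ptc : List (String × List String)) (il : List String) :
    ∀ (n : Nat) (ch : List String) (rest : List (String × Nat)) (acc : List String),
      pvGoB ptc il (ch.map (fun c => (c, n)) ++ rest) acc
        = pvGoB ptc il rest (acc ++ ch.flatMap (pvLeafOf ptc il n)) := by
  intro n
  induction n with
  | zero =>
    intro ch
    induction ch with
    | nil => intro rest acc; simp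
    | cons c ch' ih =>
      intro rest acc
      simp only [List.map_cons, List.cons_append]
      rw [pvGoB]
      by_cases hil : il.contains c
      · simp only [hil, if_true]
        rw [ih]
        have hm : c ∈ il := by simpa using hil
        simp [pvLeafOf, hm]
      · have hb : il.contains c = false := by simpa using hil
        have hm : c ∉ il := by simpa using hil
        simp only [hb, Bool.false_eq_true, if_false]
        cases hlk : pvLookup ptc c with
        | none =>
          dsimp only
          rw [ih]
          simp [pvLeafOf, hm, pvGoA]
        | some gch =>
          dsimp only
          rw [ih]
          simp [pvLeafOf, hm, pvGoA]
  | succ m ihn =>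
    intro ch
    induction ch with
    | nil => intro rest acc; simp
    | cons c ch' ih =>
      intro rest acc
      simp only [List.map_cons, List.cons_append]
      rw [pvGoB]
      by_cases hil : il.contains c
      · simp only [hil, if_true]
        rw [ih]
        have hm : c ∈ il := by simpa using hil
        simp [pvLeafOf, hm]
      · have hb : il.contains c = false := by simpa using hil
        have hm : c ∉ il := by simpa using hil
        simp only [hb, Bool.false_eq_true, if_false]
        cases hlk : pvLookup ptc c with
        | none =>
          dsimp only
          rw [ih]
          simp [pvLeafOf, hm, pvGoA, hlk]
        | some gch =>
          dsimp only
          rw [ihn gch (ch'.map (fun c => (c, m + 1)) ++ rest) acc, ih]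
          have hA : pvGoA ptc il (m + 1) c = gch.flatMap (pvLeafOf ptc il m) := by
            simp only [pvGoA, hlk]
            exact pvGoA_foldl_eq_flatMap ptc il m gch
          simp [pvLeafOf, hm, hA]

theorem pvGoB_full (ptc : List (String × List String)) (il : List String)
    (n : Nat) (ch : List String) :
    pvGoB ptc il (ch.map (fun c => (c, n))) [] = ch.flatMap (pvLeafOf ptc il n) := by
  have h := pvGoB_block ptc il n ch [] []
  rw [List.append_nil] at h
  rw [h, pvGoB]
  simp

-- ===== VERDICT (by name: the statement is the Claim_ definition above) =====
theorem get_imagenet1k_leaf_synsets_spec : Claim_equal_get_imagenet1k_leaf_synsets := by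
  intro synset ptc il _ _
  unfold Spec_get_imagenet1k_leaf_synsets
  unfold get_imagenet1k_leaf_synsets get_imagenet1k_leaf_synsets_alt
  rw [pvGoA]
  cases hlk : pvLookup ptc synset with
  | none => rfl
  | some children =>
    simp only
    rw [pvGoA_foldl_eq_flatMap, pvGoB_full]
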